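-- pv_equiv track=rewrite | github.com/manuelschipper/nah | src/nah/bash.py | _find_search_roots
-- ===== SOURCE A (Python) =====
-- _FIND_EXEC_PREDICATES = frozenset({"-exec", "-execdir", "-ok", "-okdir"})
--
-- _FIND_EXPRESSION_STARTERS = frozenset({"(", ")", "!", "not"})
--
-- _FIND_LEADING_FLAGS = frozenset({"-H", "-L", "-P"})
--
-- _FIND_LEADING_VALUE_FLAGS = frozenset({"-D", "-O"})
--
-- def _find_search_roots(tokens: list[str]) -> list[str]:
--     roots: list[str] = []
--     i = 1
--     while i < len(tokens):
--         tok = tokens[i]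
--         if tok == "--":
--             i += 1
--             continue
--         if not roots and tok in _FIND_LEADING_FLAGS:
--             i += 1
--             continue
--         if not roots and tok in _FIND_LEADING_VALUE_FLAGS:
--             i += 2
--             continue
--         if not roots and any(tok.startswith(flag) and len(tok) > len(flag) for flag in _FIND_LEADING_VALUE_FLAGS):
--             i += 1
--             continue
--         if tok in _FIND_EXEC_PREDICATES or tok in _FIND_EXPRESSION_STARTERS or tok.startswith("-"):
--             break
--         roots.append(tok)
--         i += 1
--     return roots or ["."]
-- ===== SOURCE B (Python) =====
-- _FIND_EXEC_PREDICATES = frozenset({"-exec", "-execdir", "-ok", "-okdir"})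
--
-- _FIND_EXPRESSION_STARTERS = frozenset({"(", ")", "!", "not"})
--
-- _FIND_LEADING_FLAGS = frozenset({"-H", "-L", "-P"})
--
-- _FIND_LEADING_VALUE_FLAGS = frozenset({"-D", "-O"})
--
-- def _find_search_roots(tokens: list[str]) -> list[str]:
--     rest = tokens[1:]
--     # Phase 1: consume the leading-option prefix.
--     while rest:
--         tok = rest[0]
--         if tok == "--" or tok in _FIND_LEADING_FLAGS:
--             rest = rest[1:]
--         elif tok in _FIND_LEADING_VALUE_FLAGS:
--             rest = rest[2:]
--         elif (tok.startswith("-D") or tok.startswith("-O")) and len(tok) > 2: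
--             rest = rest[1:]
--         else:
--             break
--     # Phase 2: collect the search roots.
--     roots: list[str] = []
--     for tok in rest:
--         if tok == "--":
--             continue
--         if tok in _FIND_EXEC_PREDICATES or tok in _FIND_EXPRESSION_STARTERS or tok.startswith("-"):
--             break
--         roots.append(tok)
--     return roots or ["."]
-- ===== Notes on version B (the rewrite author's own statement) =====
-- stated objective: simpler
-- what changed: Replaces A's single loop with a `not roots` mode flag by two sequential phases: first consume the leading-option prefix of the token list, then collect roots from the remaining suffix.
import Mathlib
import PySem

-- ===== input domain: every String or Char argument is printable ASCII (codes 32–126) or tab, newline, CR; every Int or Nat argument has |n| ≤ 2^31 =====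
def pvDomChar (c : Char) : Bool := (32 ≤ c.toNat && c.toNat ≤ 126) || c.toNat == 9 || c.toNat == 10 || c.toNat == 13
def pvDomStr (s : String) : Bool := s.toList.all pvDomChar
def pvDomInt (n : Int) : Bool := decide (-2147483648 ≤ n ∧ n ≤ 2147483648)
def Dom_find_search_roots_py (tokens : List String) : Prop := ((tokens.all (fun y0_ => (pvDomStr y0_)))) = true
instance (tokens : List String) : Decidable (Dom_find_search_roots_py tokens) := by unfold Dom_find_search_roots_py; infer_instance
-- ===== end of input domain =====

-- B replaces A's one loop with a `not roots` mode flag by two sequential phases (skip leading options, then collect roots); same cost, plainer structure.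

-- ===== PORT A =====
-- shared module constants of Source A, as membership tests
def pvIsExecPredicate (t : String) : Bool :=
  t == "-exec" || t == "-execdir" || t == "-ok" || t == "-okdir"
def pvIsExpressionStarter (t : String) : Bool :=
  t == "(" || t == ")" || t == "!" || t == "not"
def pvIsLeadingFlag (t : String) : Bool := t == "-H" || t == "-L" || t == "-P"
def pvIsLeadingValueFlag (t : String) : Bool := t == "-D" || t == "-O"
-- any(tok.startswith(flag) and len(tok) > len(flag) for flag in {"-D","-O"})
def pvIsAttachedValueFlag (t : String) : Bool :=
  (PySem.Str.startswith t "-D" && decide (PySem.Str.len t > PySem.Str.len "-D")) ||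
  (PySem.Str.startswith t "-O" && decide (PySem.Str.len t > PySem.Str.len "-O"))

-- A's while-loop over index i, as structural recursion on the suffix tokens[i:]
def pvA_loop (roots : List String) : List String → List String
  | [] => roots
  | tok :: rest =>
    if tok == "--" then pvA_loop roots rest
    else if roots.isEmpty && pvIsLeadingFlag tok then pvA_loop roots rest
    else if roots.isEmpty && pvIsLeadingValueFlag tok then pvA_loop roots rest.tail
    else if roots.isEmpty && pvIsAttachedValueFlag tok then pvA_loop roots rest
    else if pvIsExecPredicate tok || pvIsExpressionStarter tok || PySem.Str.startswith tok "-" then roots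
    else pvA_loop (roots ++ [tok]) rest
termination_by l => l.length
decreasing_by all_goals simp [List.length_tail] <;> omega

def find_search_roots_py (tokens : List String) : List String :=
  let roots := pvA_loop [] (tokens.drop 1)
  if roots.isEmpty then ["."] else roots

-- ===== PORT B =====
-- Phase 1: consume the leading-option prefix
def pvB_skip : List String → List String
  | [] => []
  | tok :: rest =>
    if tok == "--" || pvIsLeadingFlag tok then pvB_skip rest
    else if pvIsLeadingValueFlag tok then pvB_skip rest.tail
    else if (PySem.Str.startswith tok "-D" || PySem.Str.startswith tok "-O")
            && decide (PySem.Str.len tok > 2) then pvB_skip rest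
    else tok :: rest
termination_by l => l.length
decreasing_by all_goals simp [List.length_tail] <;> omega

-- Phase 2: collect the search roots
def pvB_collect (roots : List String) : List String → List String
  | [] => roots
  | tok :: rest =>
    if tok == "--" then pvB_collect roots rest
    else if pvIsExecPredicate tok || pvIsExpressionStarter tok || PySem.Str.startswith tok "-" then roots
    else pvB_collect (roots ++ [tok]) rest

def find_search_roots_py_alt (tokens : List String) : List String :=
  let roots := pvB_collect [] (pvB_skip (tokens.drop 1))
  if roots.isEmpty then ["."] else roots

-- ===== PRECONDITION & SPEC =====
def Spec_find_search_roots_py (tokens : List String) (out : List String) : Prop := out = find_search_roots_py_alt tokens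
instance (tokens : List String) (out : List String) : Decidable (Spec_find_search_roots_py tokens out) := by unfold Spec_find_search_roots_py; infer_instance

-- ===== CLAIM (what is proved, stated in full; the proofs are below) =====
def Claim_equal_find_search_roots_py : Prop := ∀ (tokens : List String), Dom_find_search_roots_py tokens → Spec_find_search_roots_py tokens (find_search_roots_py tokens)

-- ===== LEMMAS AND PROOFS =====

-- once roots is nonempty, A's loop is exactly B's collect phase
lemma pvA_loop_nonempty (rest : List String) : ∀ roots : List String, roots.isEmpty = false →
    pvA_loop roots rest = pvB_collect roots rest := by
  induction rest with
  | nil => intro roots h; simp [pvA_loop, pvB_collect]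
  | cons tok rest ih =>
    intro roots h
    simp only [pvA_loop, pvB_collect, h, Bool.false_and, Bool.false_eq_true, if_false]
    split_ifs with h1 h2
    · exact ih roots h
    · rfl
    · exact ih (roots ++ [tok]) (by simp)

-- the attached-flag check of A equals B's
lemma pvAttached_eq (t : String) :
    pvIsAttachedValueFlag t =
      ((PySem.Str.startswith t "-D" || PySem.Str.startswith t "-O")
        && decide (PySem.Str.len t > 2)) := by
  simp only [pvIsAttachedValueFlag]
  cases hd : PySem.Str.startswith t "-D" <;>
    cases ho : PySem.Str.startswith t "-O" <;>
      simp [hd, ho, PySem.Str.len, Bool.and_comm]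

-- with roots empty, A's loop is B: skip the leading prefix, then collect
lemma pvA_loop_empty : ∀ (n : ℕ) (rest : List String), rest.length ≤ n →
    pvA_loop [] rest = pvB_collect [] (pvB_skip rest) := by
  intro n
  induction n with
  | zero =>
    intro rest h
    have : rest = [] := by cases rest <;> simp_all
    subst this; simp [pvA_loop, pvB_skip, pvB_collect]
  | succ n ih =>
    intro rest h
    cases rest with
    | nil => simp [pvA_loop, pvB_skip, pvB_collect]
    | cons tok rest =>
      simp only [List.length_cons] at h
      simp only [pvA_loop, pvB_skip, List.isEmpty_nil, Bool.true_and, pvAttached_eq]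
      by_cases hdd : tok == "--"
      · simp only [hdd, if_true, Bool.true_or, if_true]
        exact ih rest (by omega)
      · simp only [hdd, Bool.false_or, Bool.false_eq_true, if_false]
        by_cases hlf : pvIsLeadingFlag tok
        · simp only [hlf, if_true]; exact ih rest (by omega)
        · simp only [hlf, Bool.false_eq_true, if_false]
          by_cases hvf : pvIsLeadingValueFlag tok
          · simp only [hvf, if_true]
            exact ih rest.tail (by rw [List.length_tail]; omega)
          · simp only [hvf, Bool.false_eq_true, if_false]
            by_cases hat : ((PySem.Str.startswith tok "-D" || PySem.Str.startswith tok "-O")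
                && decide (PySem.Str.len tok > 2))
            · rw [if_pos hat, if_pos hat]; exact ih rest (by omega)
            · rw [if_neg hat, if_neg hat]
              simp only [pvB_collect, hdd, Bool.false_eq_true, if_false]
              by_cases hbr : (pvIsExecPredicate tok || pvIsExpressionStarter tok
                  || PySem.Str.startswith tok "-")
              · rw [if_pos hbr, if_pos hbr]
              · simp only [hbr, if_false]
                simpa using pvA_loop_nonempty rest [tok] (by simp)

-- ===== VERDICT (by name: the statement is the Claim_ definition above) =====
theorem find_search_roots_py_spec : Claim_equal_find_search_roots_py := by
  intro tokens _
  unfold Spec_find_search_roots_py find_search_roots_py find_search_roots_py_alt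
  rw [pvA_loop_empty (tokens.drop 1).length (tokens.drop 1) le_rfl]
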